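-- pv_equiv track=rewrite | github.com/p-lots/codewars | 7-kyu/minminmax/python/solution.py | minMinMax
-- ===== SOURCE A (Python) =====
-- def minMinMax(arr):
--     smallest = min(arr)
--     biggest = max(arr)
--     ret = smallest + 1
--     for i in range(smallest + 1, biggest + 1, 1):
--         if i not in arr:
--             ret = i
--             break
--     return [smallest, ret, biggest]
-- ===== SOURCE B (Python) =====
-- def minMinMax(arr):
--     smallest = min(arr)
--     biggest = max(arr)
--     ret = smallest + 1
--     prev = smallest
--     for v in sorted(set(arr)):
--         if v > prev + 1:
--             ret = prev + 1
--             break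
--         prev = v
--     return [smallest, ret, biggest]
-- ===== Notes on version B (the rewrite author's own statement) =====
-- stated objective: alternative
-- what changed: Instead of testing every integer in range(min+1, max+1) for membership in the list, B sorts the distinct values once and scans them in order for the first gap, returning prev+1 there.
-- outside the precondition, e.g. on minMinMax([]): A raises ValueError, B raises ValueError
import Mathlib
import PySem

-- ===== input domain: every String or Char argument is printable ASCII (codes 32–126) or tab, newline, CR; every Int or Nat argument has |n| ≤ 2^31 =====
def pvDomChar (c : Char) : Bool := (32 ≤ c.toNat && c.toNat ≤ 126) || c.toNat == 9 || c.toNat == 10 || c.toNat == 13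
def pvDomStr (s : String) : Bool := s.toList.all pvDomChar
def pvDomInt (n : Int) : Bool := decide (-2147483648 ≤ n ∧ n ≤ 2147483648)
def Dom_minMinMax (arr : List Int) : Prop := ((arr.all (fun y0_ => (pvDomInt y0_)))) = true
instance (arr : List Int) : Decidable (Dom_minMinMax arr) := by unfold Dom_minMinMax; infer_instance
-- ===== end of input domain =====

-- Alternative algorithm: B sorts the distinct values once and scans them for the first gap,
-- instead of A's membership test of every candidate integer in range(min+1, max+1).

-- ===== PORT A =====
-- 'for i in range(smallest+1, biggest+1, 1): if i not in arr: ret = i; break'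
def minMinMaxLoopA (arr : List Int) (ret stop i : Int) : Int :=
  if i < stop then
    (if arr.contains i then minMinMaxLoopA arr ret stop (i + 1) else i)
  else ret   -- 'range' is lazy in Python: iterate by counter, never materialising the range
termination_by (stop - i).toNat
decreasing_by omega

def minMinMax (arr : List Int) : List Int :=
  match PySem.List.min? arr (fun x => x), PySem.List.max? arr (fun x => x) with
  | some smallest, some biggest =>
      [smallest,
       minMinMaxLoopA arr (smallest + 1) (biggest + 1) (smallest + 1),
       biggest]
  | _, _ => []   -- unreachable under Pre_ (Python's min raises ValueError on [])

-- ===== PORT B =====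
-- 'for v in sorted(set(arr)): if v > prev + 1: ret = prev + 1; break; prev = v'
def minMinMaxLoopB (ret : Int) : Int → List Int → Int
  | _, [] => ret
  | prev, v :: rest => if v > prev + 1 then prev + 1 else minMinMaxLoopB ret v rest

def minMinMax_alt (arr : List Int) : List Int :=
  match PySem.List.min? arr (fun x => x) with
  | none => []   -- unreachable under Pre_ (Python's min raises ValueError on [])
  | some smallest =>
    match PySem.List.max? arr (fun x => x) with
    | none => []
    | some biggest =>
        [smallest,
         minMinMaxLoopB (smallest + 1) smallest
           (PySem.List.sorted (PySem.Set.ofList arr) (fun x => x) false),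
         biggest]

-- ===== PRECONDITION & SPEC =====
-- Pre_ excludes only the empty list, on which Python's min() raises ValueError.
def Pre_minMinMax (arr : List Int) : Prop := arr ≠ []
instance (arr : List Int) : Decidable (Pre_minMinMax arr) := by unfold Pre_minMinMax; infer_instance
def pvWitness_minMinMax : List Int := [1, 4, 2]

def Spec_minMinMax (arr : List Int) (out : List Int) : Prop := out = minMinMax_alt arr
instance (arr : List Int) (out : List Int) : Decidable (Spec_minMinMax arr out) := by unfold Spec_minMinMax; infer_instance

-- ===== CLAIM (what is proved, stated in full; the proofs are below) =====
def Claim_equal_minMinMax : Prop := ∀ (arr : List Int), Dom_minMinMax arr → Pre_minMinMax arr → Spec_minMinMax arr (minMinMax arr)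

-- ===== LEMMAS AND PROOFS =====

-- Loop invariant: if L is the strictly increasing list of the values of arr above prev
-- (prev itself allowed at its head), then B's gap scan over L computes the same value as
-- A's scan of every integer in (prev, b] for absence from arr (b = max of arr).
lemma loopB_eq_loopA (arr : List Int) (b : Int) (hb : b ∈ arr) (hmax : ∀ x ∈ arr, x ≤ b) :
    ∀ (L : List Int) (prev ret : Int),
      L.Pairwise (· < ·) →
      (∀ x, prev < x → (x ∈ arr ↔ x ∈ L)) →
      (∀ x ∈ L, prev ≤ x) →
      minMinMaxLoopB ret prev L =
        minMinMaxLoopA arr ret (b + 1) (prev + 1) := by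
  intro L
  induction L with
  | nil =>
    intro prev ret _ hmem _
    have hble : b ≤ prev := by
      by_contra h
      exact (List.not_mem_nil).elim ((hmem b (by omega)).mp hb)
    rw [minMinMaxLoopA, if_neg (by omega)]
    rfl
  | cons v rest ih =>
    intro prev ret hpw hmem hlb
    rw [List.pairwise_cons] at hpw
    obtain ⟨hvlt, hpw'⟩ := hpw
    have hvlb : prev ≤ v := hlb v List.mem_cons_self
    by_cases hgt : prev + 1 < v
    · -- first gap found: B returns prev + 1, A's range scan stops at prev + 1 ∉ arr
      have hvarr : v ∈ arr := (hmem v (by omega)).mpr List.mem_cons_self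
      have hvb : v ≤ b := hmax v hvarr
      rw [minMinMaxLoopA, if_pos (by omega : prev + 1 < b + 1)]
      have hnc : ¬ (prev + 1) ∈ arr := by
        intro h
        rcases List.mem_cons.mp ((hmem (prev + 1) (by omega)).mp h) with h' | h'
        · omega
        · exact absurd (hvlt _ h') (by omega)
      simp [minMinMaxLoopB, hnc, hgt]
    · rcases eq_or_lt_of_le hvlb with heq | hlt
      · -- v = prev (head of the sorted set is the min itself): advance with nothing consumed
        have : minMinMaxLoopB ret prev (v :: rest) = minMinMaxLoopB ret prev rest := by
          simp [minMinMaxLoopB, ← heq]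
        rw [this]
        apply ih prev ret hpw'
        · intro x hx
          constructor
          · intro hxa
            rcases List.mem_cons.mp ((hmem x hx).mp hxa) with h' | h'
            · omega
            · exact h'
          · intro hxr
            exact (hmem x hx).mpr (List.mem_cons_of_mem _ hxr)
        · intro x hx
          have := hvlt x hx
          omega
      · -- v = prev + 1: both sides consume the value prev + 1 and continue from v
        have hveq : v = prev + 1 := by omega
        have hvarr : v ∈ arr := (hmem v hlt).mpr List.mem_cons_self
        have hvb : v ≤ b := hmax v hvarr
        have hstepA :
            minMinMaxLoopA arr ret (b + 1) (prev + 1) =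
              minMinMaxLoopA arr ret (b + 1) (v + 1) := by
          rw [minMinMaxLoopA, if_pos (by omega : prev + 1 < b + 1)]
          simp [hveq ▸ hvarr, hveq]
        rw [hstepA]
        have hstepB : minMinMaxLoopB ret prev (v :: rest) = minMinMaxLoopB ret v rest := by
          simp [minMinMaxLoopB, show ¬ v > prev + 1 by omega]
        rw [hstepB]
        apply ih v ret hpw'
        · intro x hx
          constructor
          · intro hxa
            rcases List.mem_cons.mp ((hmem x (by omega)).mp hxa) with h' | h'
            · omega
            · exact h'
          · intro hxr
            exact (hmem x (by omega)).mpr (List.mem_cons_of_mem _ hxr)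
        · intro x hx
          have := hvlt x hx
          omega

-- ===== VERDICT (by name: the statement is the Claim_ definition above) =====
theorem minMinMax_spec : Claim_equal_minMinMax := by
  intro arr _ hpre
  show minMinMax arr = minMinMax_alt arr
  cases h1 : PySem.List.min? arr (fun x => x) with
  | none => rw [PySem.List.min?_eq_none_iff] at h1; exact absurd h1 hpre
  | some s =>
    cases h2 : PySem.List.max? arr (fun x => x) with
    | none => rw [PySem.List.max?_eq_none_iff] at h2; exact absurd h2 hpre
    | some b =>
      unfold minMinMax minMinMax_alt
      rw [h1, h2]
      show [s, minMinMaxLoopA arr (s + 1) (b + 1) (s + 1), b] =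
        [s, minMinMaxLoopB (s + 1) s (PySem.List.sorted (PySem.Set.ofList arr) (fun x => x) false), b]
      have hb : b ∈ arr := PySem.List.max?_mem h2
      have hmax : ∀ x ∈ arr, x ≤ b := PySem.List.max?_isMax h2
      have hmin : ∀ x ∈ arr, s ≤ x := PySem.List.min?_isMin h1
      have hkey := loopB_eq_loopA arr b hb hmax
        (PySem.List.sorted (PySem.Set.ofList arr) (fun x => x) false) s (s + 1)
        (PySem.List.sorted_ofList_pairwise_lt arr)
        (by
          intro x _
          rw [PySem.List.mem_sorted, PySem.Set.mem_ofList])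
        (by
          intro x hx
          rw [PySem.List.mem_sorted, PySem.Set.mem_ofList] at hx
          exact hmin x hx)
      rw [hkey]
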